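-- pv_equiv track=rewrite | github.com/GizawAAiT/Codeforces | B_Robot_s_Task.py | min_turns_optimal
-- ===== SOURCE A (Python) =====
-- def min_turns_optimal(a):
--     n = len(a)
--     hacked = [False]*n
--     have = 0
--     pos, dir_ = 0, 1          # start at computer 1, moving right
--     turns = 0
--
--     while have < n:
--         # hack current computer if possible
--         if not hacked[pos] and have >= a[pos]:
--             hacked[pos] = True
--             have += 1
--             continue          # stay and check again (maybe multiple hacks)
--
--         nxt = pos + dir_
--         # need to reverse at array end
--         if nxt < 0 or nxt >= n:
--             dir_ *= -1
--             turns += 1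
--         else:
--             pos = nxt         # just walk
--
--     return turns
-- ===== SOURCE B (Python) =====
-- def min_turns_optimal(a):
--     # Worklist algorithm: no positions, no hacked array, no direction flag.
--     # Keep the unmet requirements (in current scan order); each round filter
--     # them with a running counter, then reverse the survivors (the next sweep
--     # visits them in the opposite order).  Count a turn per non-final round.
--     have = 0
--     remaining = list(a)
--     turns = 0
--     while remaining:
--         nxt = []
--         for req in remaining:
--             if req <= have:
--                 have += 1
--             else:
--                 nxt.append(req)
--         if nxt:
--             turns += 1
--         remaining = nxt[::-1]
--     return turns
-- ===== Notes on version B (the rewrite author's own statement) =====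
-- stated objective: alternative
-- what changed: A simulates a robot: a position pointer, direction flag and boolean hacked array, stepping one cell at a time with boundary tests; B drops positions entirely and keeps a shrinking worklist of unmet requirements, filtering it once per round with a running counter and reversing the survivors between rounds, counting one turn per non-final round; Pre_ excludes only inputs on which A loops forever (some prefix of the sorted requirements is unsatisfiable).
import Mathlib
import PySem

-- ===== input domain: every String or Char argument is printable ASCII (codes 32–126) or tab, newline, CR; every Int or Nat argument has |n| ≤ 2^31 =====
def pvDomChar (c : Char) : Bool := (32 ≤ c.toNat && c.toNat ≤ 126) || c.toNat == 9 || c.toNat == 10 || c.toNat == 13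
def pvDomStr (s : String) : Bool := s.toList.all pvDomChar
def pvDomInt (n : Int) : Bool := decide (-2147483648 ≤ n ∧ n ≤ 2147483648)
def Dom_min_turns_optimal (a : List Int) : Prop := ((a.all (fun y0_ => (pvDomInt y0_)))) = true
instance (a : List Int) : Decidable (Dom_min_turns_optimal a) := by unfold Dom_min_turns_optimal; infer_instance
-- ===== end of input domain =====

-- B replaces A's position/direction/hacked-array robot walk by a worklist of unmet
-- requirements, filtered once per round and reversed between rounds; return values
-- agree on Pre_ (where A terminates).

-- ===== PORT A =====
-- A's hack test `not hacked[pos] and have >= a[pos]`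
def pvHackable (a : List Int) (h : List Bool) (v : Int) (i : Nat) : Bool :=
  !(h.getD i false) && decide (a.getD i 0 ≤ v)

-- A's while-loop, step for step, with fuel (Python A diverges outside Pre_; `none` = fuel
-- exhausted, which on Pre_ inputs never happens with the fuel given below)
def pvAuxA (a : List Int) : Nat → List Bool → Int → Nat → Int → Int → Option Int
  | 0, _, _, _, _, _ => none
  | f+1, h, v, pos, dir, t =>
    if v < (a.length : Int) then
      if pvHackable a h v pos then pvAuxA a f (h.set pos true) (v+1) pos dir t
      else
        if ((pos : Int) + dir) < 0 ∨ (a.length : Int) ≤ (pos : Int) + dir then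
          pvAuxA a f h v pos (-dir) (t+1)
        else
          pvAuxA a f h v ((pos : Int) + dir).toNat dir t
    else some t

def min_turns_optimal (a : List Int) : Int :=
  (pvAuxA a ((a.length + 2) * (2 * a.length + 2)) (List.replicate a.length false) 0 0 1 0).getD 0

-- ===== PORT B =====
-- B's inner for-loop: filter `remaining` with the running counter, building `nxt`
def pvPass : Int → List Int → Int × List Int
  | v, [] => (v, [])
  | v, req :: r =>
    if req ≤ v then pvPass (v+1) r
    else
      let p := pvPass v r
      (p.1, req :: p.2)

-- B's outer while-loop over rounds, with fuel (one unit per round); `nxt[::-1]` is reversal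
def pvAuxC : Nat → Int → List Int → Int → Option Int
  | 0, _, _, _ => none
  | f+1, v, rem, t =>
    if rem.isEmpty then some t
    else
      let p := pvPass v rem
      pvAuxC f p.1 p.2.reverse (if p.2.isEmpty then t else t + 1)

def min_turns_optimal_alt (a : List Int) : Int :=
  (pvAuxC (a.length + 2) 0 a 0).getD 0

-- ===== PRECONDITION & SPEC =====
-- Pre_ excludes exactly the inputs on which Python A (and B) loop forever: the process hacks
-- all computers iff the ascending-sorted requirement list satisfies sorted(a)[i] <= i for every i.
def Pre_min_turns_optimal (a : List Int) : Prop :=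
  ∀ i, i < a.length → (PySem.List.sorted a (fun x => x) false).getD i 0 ≤ (i : Int)
instance (a : List Int) : Decidable (Pre_min_turns_optimal a) := by
  unfold Pre_min_turns_optimal; infer_instance

def pvWitness_min_turns_optimal : List Int := [0, 1, 2]

def Spec_min_turns_optimal (a : List Int) (out : Int) : Prop := out = min_turns_optimal_alt a
instance (a : List Int) (out : Int) : Decidable (Spec_min_turns_optimal a out) := by
  unfold Spec_min_turns_optimal; infer_instance

-- ===== CLAIM (what is proved, stated in full; the proofs are below) =====
def Claim_equal_min_turns_optimal : Prop :=
  ∀ (a : List Int), Dom_min_turns_optimal a → Pre_min_turns_optimal a →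
    Spec_min_turns_optimal a (min_turns_optimal a)

-- ===== LEMMAS AND PROOFS =====

-- proof-only intermediate: one full sweep of A's walk, as a scan of the index range
def pvSweep (a : List Int) : List Bool → Int → List Nat → List Bool × Int
  | h, v, [] => (h, v)
  | h, v, i :: r =>
    if v < (a.length : Int) then
      if pvHackable a h v i then pvSweep a (h.set i true) (v+1) r
      else pvSweep a h v r
    else (h, v)

-- proof-only intermediate: A's walk regrouped into whole sweeps
def pvAuxB (a : List Int) : Nat → List Bool → Int → Bool → Int → Option Int
  | 0, _, _, _, _ => none
  | f+1, h, v, fwd, t =>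
    if v < (a.length : Int) then
      let p := pvSweep a h v (if fwd then List.range a.length else (List.range a.length).reverse)
      pvAuxB a f p.1 p.2 (!fwd) (if p.2 < (a.length : Int) then t + 1 else t)
    else some t

lemma pvAuxA_succ (a : List Int) (f : Nat) (h : List Bool) (v : Int) (pos : Nat) (dir t : Int) :
    pvAuxA a (f+1) h v pos dir t =
      if v < (a.length : Int) then
        if pvHackable a h v pos then pvAuxA a f (h.set pos true) (v+1) pos dir t
        else
          if ((pos : Int) + dir) < 0 ∨ (a.length : Int) ≤ (pos : Int) + dir then
            pvAuxA a f h v pos (-dir) (t+1)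
          else
            pvAuxA a f h v ((pos : Int) + dir).toNat dir t
      else some t := rfl

lemma pvAuxB_succ (a : List Int) (f : Nat) (h : List Bool) (v : Int) (fwd : Bool) (t : Int) :
    pvAuxB a (f+1) h v fwd t =
      if v < (a.length : Int) then
        let p := pvSweep a h v (if fwd then List.range a.length else (List.range a.length).reverse)
        pvAuxB a f p.1 p.2 (!fwd) (if p.2 < (a.length : Int) then t + 1 else t)
      else some t := rfl

lemma pvAuxA_mono (a : List Int) : ∀ (f g : Nat) (h : List Bool) (v : Int) (pos : Nat) (dir t r : Int),
    f ≤ g → pvAuxA a f h v pos dir t = some r → pvAuxA a g h v pos dir t = some r := by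
  intro f
  induction f with
  | zero => intro g h v pos dir t r _ hE; simp [pvAuxA] at hE
  | succ f ih =>
    intro g h v pos dir t r hle hE
    obtain ⟨g, rfl⟩ : ∃ g', g = g' + 1 := ⟨g - 1, by omega⟩
    rw [pvAuxA_succ] at hE ⊢
    split_ifs at hE ⊢ <;> first
      | exact hE
      | exact ih _ _ _ _ _ _ _ (by omega) hE

lemma pvAuxB_mono (a : List Int) : ∀ (f g : Nat) (h : List Bool) (v : Int) (fwd : Bool) (t r : Int),
    f ≤ g → pvAuxB a f h v fwd t = some r → pvAuxB a g h v fwd t = some r := by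
  intro f
  induction f with
  | zero => intro g h v fwd t r _ hE; simp [pvAuxB] at hE
  | succ f ih =>
    intro g h v fwd t r hle hE
    obtain ⟨g, rfl⟩ : ∃ g', g = g' + 1 := ⟨g - 1, by omega⟩
    rw [pvAuxB_succ] at hE ⊢
    split_ifs at hE ⊢ <;> first
      | exact hE
      | exact ih _ _ _ _ _ _ (by omega) hE

lemma pvSweep_len (a : List Int) : ∀ (l : List Nat) (h : List Bool) (v : Int),
    ((pvSweep a h v l).1).length = h.length := by
  intro l
  induction l with
  | nil => intro h v; rfl
  | cons i r ih =>
    intro h v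
    rw [pvSweep]
    split_ifs with h1 h2
    · rw [ih]; simp
    · exact ih h v
    · rfl

lemma pvSweep_v_mono (a : List Int) : ∀ (l : List Nat) (h : List Bool) (v : Int),
    v ≤ (pvSweep a h v l).2 := by
  intro l
  induction l with
  | nil => intro h v; exact le_refl v
  | cons i r ih =>
    intro h v
    rw [pvSweep]
    split_ifs with h1 h2
    · have := ih (h.set i true) (v+1); omega
    · exact ih h v
    · exact le_refl v

lemma pvSweep_nil (a : List Int) (h : List Bool) (v : Int) : pvSweep a h v [] = (h, v) := rfl

lemma pvSweep_cons (a : List Int) (h : List Bool) (v : Int) (i : Nat) (r : List Nat) :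
    pvSweep a h v (i :: r) =
      if v < (a.length : Int) then
        (if pvHackable a h v i then pvSweep a (h.set i true) (v+1) r else pvSweep a h v r)
      else (h, v) := rfl

lemma pvHackable_set_self (a : List Int) (h : List Bool) (w : Int) (p : Nat) (hp : p < h.length) :
    pvHackable a (h.set p true) w p = false := by
  simp [pvHackable, List.getD_eq_getElem?_getD, List.getElem?_set_self hp]

-- right sweep: A walking right from p to the boundary equals a scan of [p, …, n-1]
lemma pvSimR (a : List Int) : ∀ (d p : Nat), p + d + 1 = a.length →
    ∀ (f : Nat) (h : List Bool) (v t r : Int), h.length = a.length →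
    ((pvSweep a h v (List.range' p (d+1))).2 < (a.length : Int) →
      pvAuxA a f (pvSweep a h v (List.range' p (d+1))).1 (pvSweep a h v (List.range' p (d+1))).2
        (a.length - 1) (-1) (t+1) = some r) →
    (¬ ((pvSweep a h v (List.range' p (d+1))).2 < (a.length : Int)) → r = t) →
    pvAuxA a (f + (2*(d+1) + 2)) h v p 1 t = some r := by
  intro d
  induction d with
  | zero =>
    intro p hdp f h v t r hl h1 h2
    rw [List.range'_one] at h1 h2
    have hfuel : f + (2*(0+1) + 2) = f + 3 + 1 := by omega
    rw [hfuel, pvAuxA_succ]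
    by_cases hv : v < (a.length : Int)
    · rw [if_pos hv]
      by_cases hH : pvHackable a h v p = true
      · rw [if_pos hH]
        have hsw : pvSweep a h v [p] = (h.set p true, v + 1) := by
          rw [pvSweep_cons, if_pos hv, if_pos hH, pvSweep_nil]
        rw [hsw] at h1 h2
        dsimp only at h1 h2
        have hfe : f + 3 = f + 2 + 1 := by omega
        rw [hfe, pvAuxA_succ]
        by_cases hv2 : v + 1 < (a.length : Int)
        · rw [if_pos hv2, pvHackable_set_self a h (v+1) p (by omega)]
          simp only [Bool.false_eq_true, if_false]
          have hout : ((p : Int) + 1) < 0 ∨ (a.length : Int) ≤ (p : Int) + 1 := by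
            right; omega
          rw [if_pos hout]
          have hp' : p = a.length - 1 := by omega
          rw [hp'] at h1 ⊢
          exact pvAuxA_mono a f (f+2) _ _ _ _ _ _ (by omega) (h1 hv2)
        · rw [if_neg hv2]
          rw [h2 hv2]
      · rw [if_neg hH]
        have hsw : pvSweep a h v [p] = (h, v) := by
          rw [pvSweep_cons, if_pos hv, if_neg hH, pvSweep_nil]
        rw [hsw] at h1 h2
        dsimp only at h1 h2
        have hout : ((p : Int) + 1) < 0 ∨ (a.length : Int) ≤ (p : Int) + 1 := by
          right; omega
        rw [if_pos hout]
        have hp' : p = a.length - 1 := by omega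
        rw [hp']
        exact pvAuxA_mono a f (f+3) _ _ _ _ _ _ (by omega) (h1 hv)
    · rw [if_neg hv]
      have hsw : pvSweep a h v [p] = (h, v) := by rw [pvSweep_cons, if_neg hv]
      rw [hsw] at h2
      dsimp only at h2
      rw [h2 hv]
  | succ d ih =>
    intro p hdp f h v t r hl h1 h2
    have hrl : List.range' p (d+1+1) = p :: List.range' (p+1) (d+1) := by rw [List.range'_succ]
    rw [hrl] at h1 h2
    have hfuel : f + (2*(d+1+1) + 2) = (f + (2*(d+1) + 2)) + 1 + 1 := by omega
    rw [hfuel, pvAuxA_succ]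
    by_cases hv : v < (a.length : Int)
    · rw [if_pos hv]
      by_cases hH : pvHackable a h v p = true
      · rw [if_pos hH]
        have hsw : pvSweep a h v (p :: List.range' (p+1) (d+1)) =
            pvSweep a (h.set p true) (v+1) (List.range' (p+1) (d+1)) := by
          rw [pvSweep_cons, if_pos hv, if_pos hH]
        rw [hsw] at h1 h2
        rw [pvAuxA_succ]
        by_cases hv2 : v + 1 < (a.length : Int)
        · rw [if_pos hv2, pvHackable_set_self a h (v+1) p (by omega)]
          simp only [Bool.false_eq_true, if_false]
          have hin : ¬ (((p : Int) + 1) < 0 ∨ (a.length : Int) ≤ (p : Int) + 1) := by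
            push_neg; omega
          rw [if_neg hin]
          have htn : ((p : Int) + 1).toNat = p + 1 := by omega
          rw [htn]
          exact ih (p+1) (by omega) f (h.set p true) (v+1) t r (by simp [hl]) h1 h2
        · rw [if_neg hv2]
          have hsw2 : pvSweep a (h.set p true) (v+1) (List.range' (p+1) (d+1)) =
              (h.set p true, v+1) := by
            rw [List.range'_succ, pvSweep_cons, if_neg hv2]
          rw [hsw2] at h2
          dsimp only at h2
          rw [h2 hv2]
      · rw [if_neg hH]
        have hsw : pvSweep a h v (p :: List.range' (p+1) (d+1)) =
            pvSweep a h v (List.range' (p+1) (d+1)) := by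
          rw [pvSweep_cons, if_pos hv, if_neg hH]
        rw [hsw] at h1 h2
        have hin : ¬ (((p : Int) + 1) < 0 ∨ (a.length : Int) ≤ (p : Int) + 1) := by
          push_neg; omega
        rw [if_neg hin]
        have htn : ((p : Int) + 1).toNat = p + 1 := by omega
        rw [htn]
        rw [show f + (2*(d+1) + 2) + 1 = (f+1) + (2*(d+1) + 2) from by omega]
        refine ih (p+1) (by omega) (f+1) h v t r hl ?_ ?_
        · intro hvc
          exact pvAuxA_mono a f (f+1) _ _ _ _ _ _ (by omega) (h1 hvc)
        · exact h2
    · rw [if_neg hv]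
      have hsw : pvSweep a h v (p :: List.range' (p+1) (d+1)) = (h, v) := by
        rw [pvSweep_cons, if_neg hv]
      rw [hsw] at h2
      dsimp only at h2
      rw [h2 hv]

-- left sweep: A walking left from d to the boundary equals a scan of [d, …, 0]
lemma pvSimL (a : List Int) : ∀ (d : Nat), d < a.length →
    ∀ (f : Nat) (h : List Bool) (v t r : Int), h.length = a.length →
    ((pvSweep a h v ((List.range (d+1)).reverse)).2 < (a.length : Int) →
      pvAuxA a f (pvSweep a h v ((List.range (d+1)).reverse)).1 (pvSweep a h v ((List.range (d+1)).reverse)).2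
        0 1 (t+1) = some r) →
    (¬ ((pvSweep a h v ((List.range (d+1)).reverse)).2 < (a.length : Int)) → r = t) →
    pvAuxA a (f + (2*(d+1) + 2)) h v d (-1) t = some r := by
  intro d
  induction d with
  | zero =>
    intro hd f h v t r hl h1 h2
    have hr0 : (List.range (0+1)).reverse = [0] := by rw [List.range_one]; rfl
    rw [hr0] at h1 h2
    have hfuel : f + (2*(0+1) + 2) = f + 3 + 1 := by omega
    rw [hfuel, pvAuxA_succ]
    by_cases hv : v < (a.length : Int)
    · rw [if_pos hv]
      by_cases hH : pvHackable a h v 0 = true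
      · rw [if_pos hH]
        have hsw : pvSweep a h v [0] = (h.set 0 true, v + 1) := by
          rw [pvSweep_cons, if_pos hv, if_pos hH, pvSweep_nil]
        rw [hsw] at h1 h2
        dsimp only at h1 h2
        have hfe : f + 3 = f + 2 + 1 := by omega
        rw [hfe, pvAuxA_succ]
        by_cases hv2 : v + 1 < (a.length : Int)
        · rw [if_pos hv2, pvHackable_set_self a h (v+1) 0 (by omega)]
          simp only [Bool.false_eq_true, if_false]
          have hout : (((0:Nat) : Int) + (-1)) < 0 ∨ (a.length : Int) ≤ ((0:Nat) : Int) + (-1) := by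
            left; omega
          rw [if_pos hout, neg_neg]
          exact pvAuxA_mono a f (f+2) _ _ _ _ _ _ (by omega) (h1 hv2)
        · rw [if_neg hv2]
          rw [h2 hv2]
      · rw [if_neg hH]
        have hsw : pvSweep a h v [0] = (h, v) := by
          rw [pvSweep_cons, if_pos hv, if_neg hH, pvSweep_nil]
        rw [hsw] at h1 h2
        dsimp only at h1 h2
        have hout : (((0:Nat) : Int) + (-1)) < 0 ∨ (a.length : Int) ≤ ((0:Nat) : Int) + (-1) := by
          left; omega
        rw [if_pos hout, neg_neg]
        exact pvAuxA_mono a f (f+3) _ _ _ _ _ _ (by omega) (h1 hv)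
    · rw [if_neg hv]
      have hsw : pvSweep a h v [0] = (h, v) := by rw [pvSweep_cons, if_neg hv]
      rw [hsw] at h2
      dsimp only at h2
      rw [h2 hv]
  | succ d ih =>
    intro hd f h v t r hl h1 h2
    have hrl : (List.range (d+1+1)).reverse = (d+1) :: (List.range (d+1)).reverse := by
      rw [List.range_succ]; simp
    rw [hrl] at h1 h2
    have hfuel : f + (2*(d+1+1) + 2) = (f + (2*(d+1) + 2)) + 1 + 1 := by omega
    rw [hfuel, pvAuxA_succ]
    by_cases hv : v < (a.length : Int)
    · rw [if_pos hv]
      by_cases hH : pvHackable a h v (d+1) = true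
      · rw [if_pos hH]
        have hsw : pvSweep a h v ((d+1) :: (List.range (d+1)).reverse) =
            pvSweep a (h.set (d+1) true) (v+1) ((List.range (d+1)).reverse) := by
          rw [pvSweep_cons, if_pos hv, if_pos hH]
        rw [hsw] at h1 h2
        rw [pvAuxA_succ]
        by_cases hv2 : v + 1 < (a.length : Int)
        · rw [if_pos hv2, pvHackable_set_self a h (v+1) (d+1) (by omega)]
          simp only [Bool.false_eq_true, if_false]
          have hin : ¬ ((((d+1:Nat) : Int) + (-1)) < 0 ∨ (a.length : Int) ≤ ((d+1:Nat) : Int) + (-1)) := by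
            push_neg; constructor <;> omega
          rw [if_neg hin]
          have htn : (((d+1:Nat) : Int) + (-1)).toNat = d := by omega
          rw [htn]
          exact ih (by omega) f (h.set (d+1) true) (v+1) t r (by simp [hl]) h1 h2
        · rw [if_neg hv2]
          have hne : ∃ j L, (List.range (d+1)).reverse = j :: L := by
            rw [List.range_succ]; simp
          obtain ⟨j, L, hjL⟩ := hne
          have hsw2 : pvSweep a (h.set (d+1) true) (v+1) ((List.range (d+1)).reverse) =
              (h.set (d+1) true, v+1) := by
            rw [hjL, pvSweep_cons, if_neg hv2]
          rw [hsw2] at h2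
          dsimp only at h2
          rw [h2 hv2]
      · rw [if_neg hH]
        have hsw : pvSweep a h v ((d+1) :: (List.range (d+1)).reverse) =
            pvSweep a h v ((List.range (d+1)).reverse) := by
          rw [pvSweep_cons, if_pos hv, if_neg hH]
        rw [hsw] at h1 h2
        have hin : ¬ ((((d+1:Nat) : Int) + (-1)) < 0 ∨ (a.length : Int) ≤ ((d+1:Nat) : Int) + (-1)) := by
          push_neg; constructor <;> omega
        rw [if_neg hin]
        have htn : (((d+1:Nat) : Int) + (-1)).toNat = d := by omega
        rw [htn]
        rw [show f + (2*(d+1) + 2) + 1 = (f+1) + (2*(d+1) + 2) from by omega]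
        refine ih (by omega) (f+1) h v t r hl ?_ ?_
        · intro hvc
          exact pvAuxA_mono a f (f+1) _ _ _ _ _ _ (by omega) (h1 hvc)
        · exact h2
    · rw [if_neg hv]
      have hsw : pvSweep a h v ((d+1) :: (List.range (d+1)).reverse) = (h, v) := by
        rw [pvSweep_cons, if_neg hv]
      rw [hsw] at h2
      dsimp only at h2
      rw [h2 hv]

lemma pvSimAB (a : List Int) : ∀ (fB : Nat) (h : List Bool) (v : Int) (fwd : Bool) (t r : Int),
    h.length = a.length → 0 ≤ v →
    pvAuxB a fB h v fwd t = some r →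
    pvAuxA a (fB * (2 * a.length + 2)) h v (if fwd then 0 else a.length - 1)
      (if fwd then 1 else -1) t = some r := by
  intro fB
  induction fB with
  | zero => intro h v fwd t r _ _ hE; simp [pvAuxB] at hE
  | succ fB ih =>
    intro h v fwd t r hl hv0 hE
    rw [pvAuxB_succ] at hE
    by_cases hv : v < (a.length : Int)
    · rw [if_pos hv] at hE
      have hn1 : a.length - 1 + 1 = a.length := by omega
      have hfe : (fB + 1) * (2 * a.length + 2) = fB * (2 * a.length + 2) + (2*(a.length - 1 + 1) + 2) := by
        rw [hn1]; ring
      cases fwd with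
      | true =>
        simp only [if_true, Bool.not_true] at hE
        set L := List.range a.length with hL
        have hL' : List.range' 0 (a.length - 1 + 1) = L := by
          rw [hn1, hL, List.range_eq_range']
        have hlen' : ((pvSweep a h v L).1).length = a.length := by
          rw [pvSweep_len]; exact hl
        have hv0' : 0 ≤ (pvSweep a h v L).2 :=
          le_trans hv0 (pvSweep_v_mono a L h v)
        by_cases hv' : (pvSweep a h v L).2 < (a.length : Int)
        · rw [if_pos hv'] at hE
          have hIH := ih (pvSweep a h v L).1 (pvSweep a h v L).2 false (t+1) r hlen' hv0' hE
          simp only [if_neg Bool.false_ne_true] at hIH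
          have hsim := pvSimR a (a.length - 1) 0 (by omega) (fB * (2 * a.length + 2)) h v t r hl
            (by rw [hL']; intro _; exact hIH) (by rw [hL']; intro hc; exact absurd hv' hc)
          rw [hfe]
          simpa using hsim
        · rw [if_neg hv'] at hE
          have hrt : r = t := by
            cases fB with
            | zero => simp [pvAuxB] at hE
            | succ fB' =>
              rw [pvAuxB_succ, if_neg hv'] at hE
              exact (Option.some.inj hE).symm
          have hsim := pvSimR a (a.length - 1) 0 (by omega) (fB * (2 * a.length + 2)) h v t r hl
            (by rw [hL']; intro hc; exact absurd hc hv') (by intro _; exact hrt)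
          rw [hfe]
          simpa using hsim
      | false =>
        simp only [Bool.false_eq_true, if_false, Bool.not_false] at hE
        set L := (List.range a.length).reverse with hL
        have hL' : (List.range (a.length - 1 + 1)).reverse = L := by rw [hn1]
        have hlen' : ((pvSweep a h v L).1).length = a.length := by
          rw [pvSweep_len]; exact hl
        have hv0' : 0 ≤ (pvSweep a h v L).2 :=
          le_trans hv0 (pvSweep_v_mono a L h v)
        by_cases hv' : (pvSweep a h v L).2 < (a.length : Int)
        · rw [if_pos hv'] at hE
          have hIH := ih (pvSweep a h v L).1 (pvSweep a h v L).2 true (t+1) r hlen' hv0' hE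
          simp only [if_true] at hIH
          have hsim := pvSimL a (a.length - 1) (by omega) (fB * (2 * a.length + 2)) h v t r hl
            (by rw [hL']; intro _; exact hIH) (by rw [hL']; intro hc; exact absurd hv' hc)
          rw [hfe]
          simpa using hsim
        · rw [if_neg hv'] at hE
          have hrt : r = t := by
            cases fB with
            | zero => simp [pvAuxB] at hE
            | succ fB' =>
              rw [pvAuxB_succ, if_neg hv'] at hE
              exact (Option.some.inj hE).symm
          have hsim := pvSimL a (a.length - 1) (by omega) (fB * (2 * a.length + 2)) h v t r hl
            (by rw [hL']; intro hc; exact absurd hc hv') (by intro _; exact hrt)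
          rw [hfe]
          simpa using hsim
    · rw [if_neg hv] at hE
      have hrt : r = t := (Option.some.inj hE).symm
      subst hrt
      apply pvAuxA_mono a 1 ((fB+1) * (2 * a.length + 2)) _ _ _ _ _ _
        (le_trans (by omega) (Nat.le_mul_of_pos_left _ (by omega)))
      rw [show (1:Nat) = 0 + 1 by rfl, pvAuxA_succ, if_neg hv]

-- invariant: hacked count = have
def pvInv (a : List Int) (h : List Bool) (v : Int) : Prop :=
  h.length = a.length ∧ (h.count true : Int) = v

lemma pvCount_set_true : ∀ (h : List Bool) (p : Nat), p < h.length → h.getD p false = false →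
    (h.set p true).count true = h.count true + 1 := by
  intro h
  induction h with
  | nil => intro p hp _; simp at hp
  | cons b tl ih =>
    intro p hp hf
    cases p with
    | zero =>
      simp only [List.getD_cons_zero] at hf
      subst hf
      simp
    | succ p =>
      simp only [List.getD_cons_succ] at hf
      simp only [List.length_cons, Nat.add_lt_add_iff_right] at hp
      simp only [List.set_cons_succ, List.count_cons, ih p hp hf]
      omega

lemma pvSweep_inv (a : List Int) : ∀ (l : List Nat) (h : List Bool) (v : Int),
    (∀ i ∈ l, i < a.length) → pvInv a h v →
    pvInv a (pvSweep a h v l).1 (pvSweep a h v l).2 := by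
  intro l
  induction l with
  | nil => intro h v _ hI; exact hI
  | cons i r ih =>
    intro h v hmem hI
    rw [pvSweep]
    split_ifs with h1 h2
    · apply ih _ _ (fun j hj => hmem j (List.mem_cons_of_mem _ hj))
      have hgf : h.getD i false = false := by
        simp only [pvHackable, Bool.and_eq_true, Bool.not_eq_true'] at h2
        exact h2.1
      have hil : i < h.length := by rw [hI.1]; exact hmem i (List.mem_cons_self)
      refine ⟨by simp [hI.1], ?_⟩
      rw [pvCount_set_true h i hil hgf]
      push_cast
      rw [hI.2]
    · exact ih _ _ (fun j hj => hmem j (List.mem_cons_of_mem _ hj)) hI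
    · exact hI

lemma pvSweep_hits (a : List Int) : ∀ (l : List Nat) (h : List Bool) (v : Int) (i : Nat),
    i ∈ l → v < (a.length : Int) → pvHackable a h v i = true →
    v + 1 ≤ (pvSweep a h v l).2 := by
  intro l
  induction l with
  | nil => intro h v i hi; simp at hi
  | cons j r ih =>
    intro h v i hi hvn hH
    rw [pvSweep, if_pos hvn]
    split_ifs with h2
    · have := pvSweep_v_mono a r (h.set j true) (v+1); omega
    · rcases List.mem_cons.mp hi with rfl | hir
      · exact absurd hH (by simp [h2])
      · exact ih h v i hir hvn hH

lemma pvCountP_range_getD {α : Type} (d : α) (p : α → Bool) :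
    ∀ (l : List α), (List.range l.length).countP (fun i => p (l.getD i d)) = l.countP p := by
  intro l
  induction l with
  | nil => rfl
  | cons x tl ih =>
    simp only [List.length_cons, List.range_succ_eq_map, List.countP_cons, List.countP_map]
    simp only [List.getD_cons_zero, List.getD_cons_succ, Function.comp_def]
    rw [ih]

lemma pvSortedPrefixCount (s : List Int) (v : Int) (m : Nat) (hm : m < s.length)
    (hv : s[m] ≤ v)
    (hmono : ∀ (p q : Nat) (hpq : p ≤ q) (hq : q < s.length), s[p]'(Nat.lt_of_le_of_lt hpq hq) ≤ s[q]) :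
    m + 1 ≤ s.countP (fun x => decide (x ≤ v)) := by
  have htake : ∀ x ∈ s.take (m+1), (fun x => decide (x ≤ v)) x = true := by
    intro x hx
    rw [List.mem_take_iff_getElem] at hx
    obtain ⟨k, hk, rfl⟩ := hx
    have hk1 : k < s.length := by omega
    have hk2 : k ≤ m := by omega
    have h1 := hmono k m hk2 hm
    simp
    omega
  have hsplit := List.countP_append (p := fun x => decide (x ≤ v)) (l₁ := s.take (m+1)) (l₂ := s.drop (m+1))
  rw [List.take_append_drop] at hsplit
  have hlen : (s.take (m+1)).length = m + 1 := by rw [List.length_take]; omega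
  have heq := List.countP_eq_length.mpr htake
  omega

lemma pvExistsHackable (a : List Int) (hPre : Pre_min_turns_optimal a) (h : List Bool) (v : Int)
    (hInv : pvInv a h v) (hv0 : 0 ≤ v) (hvn : v < (a.length : Int)) :
    ∃ i, i < a.length ∧ pvHackable a h v i = true := by
  by_contra hno
  push_neg at hno
  have hall : ∀ i, i < a.length → (decide (a.getD i 0 ≤ v)) = true → h.getD i false = true := by
    intro i hi hd
    by_contra hgf
    exact hno i hi (by simp [pvHackable, Bool.not_eq_true] at hgf ⊢; exact ⟨hgf, of_decide_eq_true hd⟩)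
  have hslen : (PySem.List.sorted a (fun x => x) false).length = a.length :=
    (PySem.List.sorted_perm a (fun x => x) false).length_eq
  have hvnlt : v.toNat < a.length := by omega
  have hv : (PySem.List.sorted a (fun x => x) false)[v.toNat]'(by omega) ≤ v := by
    have hp := hPre v.toNat hvnlt
    rw [List.getD_eq_getElem _ _ (by omega)] at hp
    omega
  have hcnt := pvSortedPrefixCount (PySem.List.sorted a (fun x => x) false) v v.toNat (by omega) hv
      (fun p q hpq hq => PySem.List.sorted_id_getElem_mono a hpq hq)
  have hcount1 : v.toNat + 1 ≤ a.countP (fun x => decide (x ≤ v)) := by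
    rw [← (PySem.List.sorted_perm a (fun x => x) false).countP_eq]
    exact hcnt
  have hA : (List.range a.length).countP (fun i => decide (a.getD i 0 ≤ v)) = a.countP (fun x => decide (x ≤ v)) :=
    pvCountP_range_getD 0 (fun x => decide (x ≤ v)) a
  have hB : (List.range h.length).countP (fun i => h.getD i false) = h.count true := by
    have := pvCountP_range_getD false (fun b => b) h
    simpa [List.count] using this
  have hmono : (List.range a.length).countP (fun i => decide (a.getD i 0 ≤ v)) ≤
      (List.range a.length).countP (fun i => h.getD i false) := by
    apply List.countP_mono_left
    intro i hi hd
    exact hall i (List.mem_range.mp hi) hd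
  rw [hInv.1] at hB
  have hc : (h.count true : Int) = v := hInv.2
  omega

lemma pvTermB (a : List Int) (hPre : Pre_min_turns_optimal a) :
    ∀ (k : Nat) (h : List Bool) (v : Int) (fwd : Bool) (t : Int),
    pvInv a h v → 0 ≤ v → a.length ≤ v.toNat + k →
    ∃ r, pvAuxB a (k+1) h v fwd t = some r := by
  intro k
  induction k with
  | zero =>
    intro h v fwd t _ hv0 hk
    have hv : ¬ (v < (a.length : Int)) := by omega
    exact ⟨t, by rw [pvAuxB_succ, if_neg hv]⟩
  | succ k ih =>
    intro h v fwd t hInv hv0 hk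
    by_cases hv : v < (a.length : Int)
    · set L := (if fwd then List.range a.length else (List.range a.length).reverse) with hL
      have hmem : ∀ i ∈ L, i < a.length := by
        intro i hi
        cases fwd <;> simp [hL] at hi <;> exact hi
      obtain ⟨i, hi, hH⟩ := pvExistsHackable a hPre h v hInv hv0 hv
      have hiL : i ∈ L := by cases fwd <;> simp [hL, hi]
      have hv1 : v + 1 ≤ (pvSweep a h v L).2 := pvSweep_hits a L h v i hiL hv hH
      have hInv' := pvSweep_inv a L h v hmem hInv
      obtain ⟨r, hr⟩ := ih (pvSweep a h v L).1 (pvSweep a h v L).2 (!fwd)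
        (if (pvSweep a h v L).2 < (a.length : Int) then t + 1 else t) hInv' (by omega) (by omega)
      exact ⟨r, by rw [pvAuxB_succ, if_pos hv]; exact hr⟩
    · exact ⟨t, by rw [pvAuxB_succ, if_neg hv]⟩

-- ===== correspondence between B's worklist rounds and A's sweeps =====

-- the worklist determined by the hacked array and a scan order
def pvRemOf (a : List Int) (h : List Bool) (ord : List Nat) : List Int :=
  (ord.filter (fun i => !h.getD i false)).map (fun i => a.getD i 0)

def pvOrd (a : List Int) (fwd : Bool) : List Nat :=
  if fwd then List.range a.length else (List.range a.length).reverse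

lemma pvGetD_set_ne (h : List Bool) (i j : Nat) (hne : j ≠ i) :
    (h.set i true).getD j false = h.getD j false := by
  simp [List.getD_eq_getElem?_getD, List.getElem?_set_ne (Ne.symm hne)]

lemma pvGetD_set_true (h : List Bool) (i : Nat) (hi : i < h.length) :
    (h.set i true).getD i false = true := by
  simp [List.getD_eq_getElem?_getD, List.getElem?_set_self hi]

lemma pvSweep_flag_mono (a : List Int) : ∀ (l : List Nat) (h : List Bool) (v : Int) (j : Nat),
    h.getD j false = true → ((pvSweep a h v l).1).getD j false = true := by
  intro l
  induction l with
  | nil => intro h v j hj; exact hj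
  | cons i r ih =>
    intro h v j hj
    rw [pvSweep]
    split_ifs with h1 h2
    · apply ih
      by_cases hji : j = i
      · subst hji
        by_cases hlen : j < h.length
        · exact pvGetD_set_true h j hlen
        · rw [List.set_eq_of_length_le (by omega)]; exact hj
      · rw [pvGetD_set_ne h i j hji]; exact hj
    · exact ih h v j hj
    · exact hj

lemma pvSweep_untouched (a : List Int) : ∀ (l : List Nat) (h : List Bool) (v : Int) (j : Nat),
    j ∉ l → ((pvSweep a h v l).1).getD j false = h.getD j false := by
  intro l
  induction l with
  | nil => intro h v j _; rfl
  | cons i r ih =>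
    intro h v j hj
    have hji : j ≠ i := fun he => hj (he ▸ List.mem_cons_self)
    have hjr : j ∉ r := fun he => hj (List.mem_cons_of_mem _ he)
    rw [pvSweep]
    split_ifs with h1 h2
    · rw [ih _ _ _ hjr, pvGetD_set_ne h i j hji]
    · exact ih h v j hjr
    · rfl

lemma pvAllTrue (h : List Bool) (hc : (h.length : Int) ≤ (h.count true : Int)) :
    ∀ j, j < h.length → h.getD j false = true := by
  intro j hj
  have hle : h.count true ≤ h.length := List.count_le_length
  have heq : h.count true = h.length := by omega
  have hall := List.count_eq_length.mp heq
  rw [List.getD_eq_getElem h false hj]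
  exact (hall h[j] (List.getElem_mem hj)).symm

-- one round of B's worklist filter equals one of A's sweeps
lemma pvPassSweep (a : List Int) : ∀ (ord : List Nat) (h : List Bool) (v : Int),
    ord.Nodup → (∀ i ∈ ord, i < a.length) → pvInv a h v →
    pvPass v (pvRemOf a h ord) =
      ((pvSweep a h v ord).2, pvRemOf a (pvSweep a h v ord).1 ord) := by
  intro ord
  induction ord with
  | nil => intro h v _ _ _; rfl
  | cons i r ih =>
    intro h v hnd hbd hInv
    have hnd' : r.Nodup := hnd.of_cons
    have hir : i ∉ r := by simp [List.nodup_cons] at hnd; exact hnd.1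
    have hbd' : ∀ j ∈ r, j < a.length := fun j hj => hbd j (List.mem_cons_of_mem _ hj)
    have hia : i < a.length := hbd i List.mem_cons_self
    by_cases hv : v < (a.length : Int)
    · rw [pvSweep_cons, if_pos hv]
      by_cases hhi : h.getD i false = true
      · -- already hacked: worklist skips i, sweep skips i
        have hH : pvHackable a h v i = false := by
          simp [pvHackable, ← List.getD_eq_getElem?_getD, hhi]
        rw [if_neg (by simp [hH])]
        have hrem : pvRemOf a h (i :: r) = pvRemOf a h r := by
          simp [pvRemOf, List.filter_cons, ← List.getD_eq_getElem?_getD, hhi]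
        rw [hrem, ih h v hnd' hbd' hInv]
        have hfin : ((pvSweep a h v r).1).getD i false = true :=
          pvSweep_flag_mono a r h v i hhi
        simp [pvRemOf, List.filter_cons, ← List.getD_eq_getElem?_getD, hfin]
      · -- not hacked yet: i heads the worklist
        have hhif : h.getD i false = false := by simp [Bool.not_eq_true] at hhi; exact hhi
        have hrem : pvRemOf a h (i :: r) = a.getD i 0 :: pvRemOf a h r := by
          simp [pvRemOf, List.filter_cons, ← List.getD_eq_getElem?_getD, hhif]
        rw [hrem]
        by_cases hle : a.getD i 0 ≤ v
        · -- hackable: both hack i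
          have hH : pvHackable a h v i = true := by
            simp [pvHackable, ← List.getD_eq_getElem?_getD, hhif, hle]
          rw [if_pos hH, pvPass, if_pos hle]
          have hil : i < h.length := by rw [hInv.1]; exact hia
          have hset : pvRemOf a (h.set i true) r = pvRemOf a h r := by
            unfold pvRemOf
            congr 1
            apply List.filter_congr
            intro j hj
            rw [pvGetD_set_ne h i j (fun he => hir (he ▸ hj))]
          have hInv' : pvInv a (h.set i true) (v+1) := by
            refine ⟨by simp [hInv.1], ?_⟩
            rw [pvCount_set_true h i hil hhif]
            push_cast
            rw [hInv.2]
          rw [← hset, ih (h.set i true) (v+1) hnd' hbd' hInv']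
          have hfin : ((pvSweep a (h.set i true) (v+1) r).1).getD i false = true :=
            pvSweep_flag_mono a r _ _ i (pvGetD_set_true h i hil)
          simp [pvRemOf, List.filter_cons, ← List.getD_eq_getElem?_getD, hfin]
        · -- requirement unmet: worklist keeps i, sweep skips i
          have hH : pvHackable a h v i = false := by
            simp [pvHackable, ← List.getD_eq_getElem?_getD]
            intro _
            omega
          rw [if_neg (by simp [hH]), pvPass]
          rw [if_neg hle]
          rw [ih h v hnd' hbd' hInv]
          have hunt : ((pvSweep a h v r).1).getD i false = false := by
            rw [pvSweep_untouched a r h v i hir]; exact hhif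
          simp [pvRemOf, List.filter_cons, ← List.getD_eq_getElem?_getD, hunt]
    · -- have already = n: the worklist is empty and the sweep is a no-op
      rw [pvSweep_cons, if_neg hv]
      have hall : ∀ j, j < h.length → h.getD j false = true := by
        apply pvAllTrue
        rw [hInv.2, hInv.1]
        omega
      have hrem : pvRemOf a h (i :: r) = [] := by
        unfold pvRemOf
        rw [List.filter_eq_nil_iff.mpr, List.map_nil]
        intro j hj
        simp [← List.getD_eq_getElem?_getD, hall j (by rw [hInv.1]; exact hbd j hj)]
      rw [hrem]
      rfl

-- the worklist is exhausted exactly when all computers are hacked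
lemma pvRemEmpty (a : List Int) (h : List Bool) (v : Int) (ord : List Nat)
    (hInv : pvInv a h v) (hbd : ∀ i ∈ ord, i < a.length) (hcov : ∀ i, i < a.length → i ∈ ord) :
    pvRemOf a h ord = [] ↔ ¬ v < (a.length : Int) := by
  constructor
  · intro hnil
    have hfil : ord.filter (fun i => !h.getD i false) = [] := by
      unfold pvRemOf at hnil
      exact List.map_eq_nil_iff.mp hnil
    have hall : ∀ i ∈ ord, h.getD i false = true := by
      intro i hi
      have := List.filter_eq_nil_iff.mp hfil i hi
      simpa using this
    have hcnt : (List.range h.length).countP (fun i => h.getD i false) = h.count true :=  by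
      have := pvCountP_range_getD false (fun b => b) h
      simpa [List.count] using this
    have hfull : (List.range h.length).countP (fun i => h.getD i false) = h.length := by
      rw [List.countP_eq_length.mpr]
      · simp
      · intro i hi
        exact hall i (hcov i (by rw [← hInv.1]; exact List.mem_range.mp hi))
    have : h.count true = h.length := by omega
    have hc := hInv.2
    rw [this, hInv.1] at hc
    omega
  · intro hv
    unfold pvRemOf
    rw [List.filter_eq_nil_iff.mpr, List.map_nil]
    intro j hj
    have hall : ∀ i, i < h.length → h.getD i false = true := by
      apply pvAllTrue
      rw [hInv.2, hInv.1]
      omega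
    simp [← List.getD_eq_getElem?_getD, hall j (by rw [hInv.1]; exact hbd j hj)]

lemma pvOrd_bd (a : List Int) (fwd : Bool) : ∀ i ∈ pvOrd a fwd, i < a.length := by
  intro i hi
  cases fwd <;> simp [pvOrd] at hi <;> exact hi

lemma pvOrd_cov (a : List Int) (fwd : Bool) : ∀ i, i < a.length → i ∈ pvOrd a fwd := by
  intro i hi
  cases fwd <;> simp [pvOrd, hi]

lemma pvOrd_nodup (a : List Int) (fwd : Bool) : (pvOrd a fwd).Nodup := by
  cases fwd <;> simp [pvOrd, List.nodup_range]

lemma pvOrd_reverse (a : List Int) (fwd : Bool) : (pvOrd a fwd).reverse = pvOrd a (!fwd) := by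
  cases fwd <;> simp [pvOrd]

lemma pvRemOf_reverse (a : List Int) (h : List Bool) (ord : List Nat) :
    (pvRemOf a h ord).reverse = pvRemOf a h ord.reverse := by
  simp [pvRemOf, List.filter_reverse, List.map_reverse]

-- B's round loop equals A's sweep loop, fuel for fuel
lemma pvAuxCB (a : List Int) : ∀ (f : Nat) (h : List Bool) (v : Int) (fwd : Bool) (t : Int),
    pvInv a h v →
    pvAuxC f v (pvRemOf a h (pvOrd a fwd)) t = pvAuxB a f h v fwd t := by
  intro f
  induction f with
  | zero => intro h v fwd t _; rfl
  | succ f ih =>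
    intro h v fwd t hInv
    have hbd := pvOrd_bd a fwd
    have hcov := pvOrd_cov a fwd
    have hiff := pvRemEmpty a h v (pvOrd a fwd) hInv hbd hcov
    rw [pvAuxC, pvAuxB_succ]
    by_cases hv : v < (a.length : Int)
    · have hne : ¬ (pvRemOf a h (pvOrd a fwd)).isEmpty = true := by
        rw [List.isEmpty_iff]
        intro hc
        exact (hiff.mp hc) hv
      rw [if_neg hne, if_pos hv]
      have hpass := pvPassSweep a (pvOrd a fwd) h v (pvOrd_nodup a fwd) hbd hInv
      rw [hpass]
      dsimp only
      set sw := pvSweep a h v (pvOrd a fwd) with hsw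
      have hord : (if fwd = true then List.range a.length else (List.range a.length).reverse) =
          pvOrd a fwd := rfl
      rw [hord]
      have hInv' : pvInv a sw.1 sw.2 := pvSweep_inv a (pvOrd a fwd) h v hbd hInv
      have hiff' := pvRemEmpty a sw.1 sw.2 (pvOrd a fwd) hInv' hbd hcov
      have hcond : (if (pvRemOf a sw.1 (pvOrd a fwd)).isEmpty = true then t else t + 1) =
          (if sw.2 < (a.length : Int) then t + 1 else t) := by
        by_cases hv2 : sw.2 < (a.length : Int)
        · rw [if_pos hv2, if_neg]
          rw [List.isEmpty_iff]
          intro hc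
          exact (hiff'.mp hc) hv2
        · rw [if_neg hv2, if_pos]
          rw [List.isEmpty_iff]
          exact hiff'.mpr hv2
      rw [hcond, pvRemOf_reverse, pvOrd_reverse]
      exact ih sw.1 sw.2 (!fwd) _ hInv'
    · rw [if_neg hv, if_pos]
      rw [List.isEmpty_iff]
      exact hiff.mpr hv

lemma pvMapGetDRange (l : List Int) : (List.range l.length).map (fun i => l.getD i 0) = l := by
  apply List.ext_getElem
  · simp
  · intro i h1 h2
    simp [List.getElem?_eq_getElem h2]

lemma pvRemOf_init (a : List Int) :
    pvRemOf a (List.replicate a.length false) (pvOrd a true) = a := by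
  unfold pvRemOf pvOrd
  rw [if_pos rfl, List.filter_eq_self.mpr, pvMapGetDRange]
  intro i hi
  have hlt : i < a.length := List.mem_range.mp hi
  simp [List.getD_eq_getElem?_getD, List.getElem?_replicate, hlt]

-- ===== VERDICT (by name: the statement is the Claim_ definition above) =====
theorem min_turns_optimal_spec : Claim_equal_min_turns_optimal := by
  intro a hDom hPre
  unfold Spec_min_turns_optimal min_turns_optimal min_turns_optimal_alt
  have hInv0 : pvInv a (List.replicate a.length false) 0 := by
    refine ⟨by simp, ?_⟩
    simp [List.count_replicate]
  obtain ⟨r, hr⟩ := pvTermB a hPre a.length (List.replicate a.length false) 0 true 0 hInv0 le_rfl (by omega)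
  have hrB : pvAuxB a (a.length + 2) (List.replicate a.length false) 0 true 0 = some r :=
    pvAuxB_mono a (a.length + 1) (a.length + 2) _ _ _ _ _ (by omega) hr
  have hrA := pvSimAB a (a.length + 2) (List.replicate a.length false) 0 true 0 r (by simp) le_rfl hrB
  simp only [if_true] at hrA
  have hC : pvAuxC (a.length + 2) 0 a 0 =
      pvAuxB a (a.length + 2) (List.replicate a.length false) 0 true 0 := by
    have h0 := pvAuxCB a (a.length + 2) (List.replicate a.length false) 0 true 0 hInv0
    rwa [pvRemOf_init] at h0
  rw [hC, hrB, hrA]
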